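-- pv_equiv track=rewrite | github.com/Jammy2211/PyAutoCTI | autocti/charge_injection/ou_sim_ci.py | injection_total_from
-- ===== SOURCE A (Python) =====
-- import math
--
-- def injection_total_from(
--     injection_start: int,
--     injection_end: int,
--     injection_on: int,
--     injection_off: int,
-- ):
--     """
--     The total number of charge injection regions for these electronics settings.
--     """
--
--     injection_range = injection_end - injection_start
--
--     for injection_total in range(100):
--         total_pixels = math.floor(
--             (injection_total + 1) * (injection_on) + injection_total * injection_off
--         )
--
--         if total_pixels > injection_range:
--             return injection_total
-- ===== SOURCE B (Python) =====
-- def injection_total_from(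
--     injection_start: int,
--     injection_end: int,
--     injection_on: int,
--     injection_off: int,
-- ):
--     injection_range = injection_end - injection_start
--     step = injection_on + injection_off
--     if step > 0:
--         # pixels(t) = on + t*step is strictly increasing; smallest t with
--         # pixels(t) > range is floor((range - on)/step) + 1.
--         t0 = (injection_range - injection_on) // step + 1
--         if t0 <= 0:
--             return 0
--         if t0 < 100:
--             return t0
--         return None
--     # step <= 0: pixels(t) is non-increasing, so only t = 0 can qualify.
--     return 0 if injection_on > injection_range else None
-- ===== Notes on version B (the rewrite author's own statement) =====
-- stated objective: faster
-- what changed: Replaced the 100-iteration linear search with a closed-form floor-division solve of on + t*(on+off) > range, split on the sign of on+off.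
import Mathlib
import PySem

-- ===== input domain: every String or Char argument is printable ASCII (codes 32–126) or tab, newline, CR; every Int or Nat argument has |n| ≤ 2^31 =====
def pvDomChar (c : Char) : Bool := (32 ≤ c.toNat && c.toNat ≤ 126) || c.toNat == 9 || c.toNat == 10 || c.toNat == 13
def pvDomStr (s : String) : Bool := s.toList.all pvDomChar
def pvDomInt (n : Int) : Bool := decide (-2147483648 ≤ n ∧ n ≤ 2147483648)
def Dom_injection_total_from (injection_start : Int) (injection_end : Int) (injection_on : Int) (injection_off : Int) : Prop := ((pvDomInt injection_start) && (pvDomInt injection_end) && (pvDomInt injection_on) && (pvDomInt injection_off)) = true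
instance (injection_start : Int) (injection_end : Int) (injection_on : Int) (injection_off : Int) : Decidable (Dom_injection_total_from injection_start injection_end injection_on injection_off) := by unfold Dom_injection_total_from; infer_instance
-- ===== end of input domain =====

-- B replaces A's bounded linear search by a closed-form floor-division solve (objective: faster, constant factor).

-- ===== PORT A =====
-- the 'for injection_total in range(100): … return injection_total' loop, falling through to None
def injA_loop (r von voff : Int) : List Int → Option Int
  | [] => none
  | t :: ts => if (t + 1) * von + t * voff > r then some t else injA_loop r von voff ts

def injection_total_from (injection_start : Int) (injection_end : Int) (injection_on : Int) (injection_off : Int) : Option Int :=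
  let injection_range := injection_end - injection_start
  injA_loop injection_range injection_on injection_off (PySem.List.pyRange 0 100 1)

-- ===== PORT B =====
def injection_total_from_alt (injection_start : Int) (injection_end : Int) (injection_on : Int) (injection_off : Int) : Option Int :=
  let injection_range := injection_end - injection_start
  let step := injection_on + injection_off
  if step > 0 then
    let t0 := PySem.Int.floordiv (injection_range - injection_on) step + 1
    if t0 ≤ 0 then some 0
    else if t0 < 100 then some t0
    else none
  else if injection_on > injection_range then some 0 else none

-- ===== PRECONDITION & SPEC =====
def Spec_injection_total_from (injection_start : Int) (injection_end : Int) (injection_on : Int) (injection_off : Int) (out : Option Int) : Prop := out = injection_total_from_alt injection_start injection_end injection_on injection_off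
instance (injection_start : Int) (injection_end : Int) (injection_on : Int) (injection_off : Int) (out : Option Int) : Decidable (Spec_injection_total_from injection_start injection_end injection_on injection_off out) := by unfold Spec_injection_total_from; infer_instance

-- ===== CLAIM (what is proved, stated in full; the proofs are below) =====
def Claim_equal_injection_total_from : Prop := ∀ (injection_start : Int) (injection_end : Int) (injection_on : Int) (injection_off : Int), Dom_injection_total_from injection_start injection_end injection_on injection_off → Spec_injection_total_from injection_start injection_end injection_on injection_off (injection_total_from injection_start injection_end injection_on injection_off)

-- ===== LEMMAS AND PROOFS =====

-- If no element of the list satisfies the loop's condition, the loop falls through to none.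
theorem injA_loop_none (r von voff : Int) (L : List Int)
    (h : ∀ t ∈ L, ¬ ((t + 1) * von + t * voff > r)) : injA_loop r von voff L = none := by
  induction L with
  | nil => rfl
  | cons t ts ih =>
    simp only [injA_loop]
    rw [if_neg (h t (by simp))]
    exact ih (fun x hx => h x (by simp [hx]))

-- When the condition is 'q < t', the loop over consecutive integers [k, k+n) finds the first such t.
theorem injA_loop_first (r von voff q : Int)
    (h : ∀ t : Int, ((t + 1) * von + t * voff > r) ↔ q < t) :
    ∀ (n : Nat) (k : Int), injA_loop r von voff (PySem.List.pyRange k (k + n) 1) =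
      if k ≤ q then (if q + 1 < k + n then some (q + 1) else none)
      else (if n = 0 then none else some k) := by
  intro n
  induction n with
  | zero =>
    intro k
    rw [PySem.List.pyRange_one_eq_nil (by omega)]
    simp only [injA_loop]
    split_ifs <;> first | rfl | omega
  | succ m ih =>
    intro k
    rw [PySem.List.pyRange_one_cons (by push_cast; omega : k < k + ((m + 1 : Nat) : Int))]
    simp only [injA_loop]
    by_cases hk : q < k
    · rw [if_pos ((h k).mpr hk)]
      split_ifs <;> first | rfl | omega
    · rw [if_neg (fun hc => hk ((h k).mp hc))]
      have hrec := ih (k + 1)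
      have harg : k + 1 + (m : Int) = k + ((m + 1 : Nat) : Int) := by push_cast; ring
      rw [harg] at hrec
      rw [hrec]
      split_ifs <;> first | rfl | omega | (simp only [Option.some.injEq]; omega)

-- ===== VERDICT (by name: the statement is the Claim_ definition above) =====
theorem injection_total_from_spec : Claim_equal_injection_total_from := by
  intro s e von voff _
  unfold Spec_injection_total_from injection_total_from injection_total_from_alt
  simp only []
  set r := e - s with hr
  by_cases hstep : von + voff > 0
  · -- increasing case: closed form via floor division
    set q := PySem.Int.floordiv (r - von) (von + voff) with hq
    have hcond : ∀ t : Int, ((t + 1) * von + t * voff > r) ↔ q < t := by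
      intro t
      have hb := (PySem.Int.le_floordiv_iff_mul_le (a := r - von) (b := von + voff) (q := t) hstep)
      rw [← hq] at hb
      have hre : (t + 1) * von + t * voff = t * (von + voff) + von := by ring
      rw [hre]
      omega
    have h100 : (0 : Int) + (100 : Nat) = 100 := by norm_num
    have := injA_loop_first r von voff q hcond 100 0
    rw [h100] at this
    rw [this]
    rw [if_pos hstep]
    split_ifs <;> first | rfl | omega
  · -- non-increasing case: only t = 0 can qualify
    rw [if_neg hstep]
    rw [PySem.List.pyRange_one_cons (by omega : (0:Int) < 100)]
    simp only [injA_loop]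
    have h0 : ((0:Int) + 1) * von + 0 * voff = von := by ring
    by_cases hon : von > r
    · rw [if_pos (by omega : ((0:Int) + 1) * von + 0 * voff > r), if_pos hon]
    · rw [if_neg (by omega : ¬ (((0:Int) + 1) * von + 0 * voff > r)), if_neg hon]
      apply injA_loop_none
      intro t ht
      have h1 : (1:Int) ≤ t := (PySem.List.mem_pyRange_one.mp ht).1
      have h2 : t * (von + voff) ≤ 0 := mul_nonpos_of_nonneg_of_nonpos (by omega) (by omega)
      have hre : (t + 1) * von + t * voff = t * (von + voff) + von := by ring
      omega
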